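-- pv_equiv track=rewrite | github.com/DorianKid/LinerarAlgebraApp | App/pages/2_😎_Matrices_and_Determinants.py | attached_matrix_procedure
-- ===== SOURCE A (Python) =====
-- def determinant_to_latex(matrix):
--     latex = r'\begin{vmatrix}'
--     for row in matrix:
--         latex += ' & '.join(map(str, row)) + r'\\'
--     latex += r'\end{vmatrix}'
--     return latex
--
-- def determinant_procedure(matrix):
--     def determinant_step(matrix, step):
--         n = len(matrix)
--         if n == 2:
--             elements = matrix[0][0], matrix[0][1], matrix[1][0], matrix[1][1]
--             a, b, c, d = elements
--             if step == 1:
--                 al, bl, cl, dl = [f"({i})" if i < 0 else f"{i}" for i in elements]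
--                 return f"[{al} \\cdot {dl} - ({bl} \\cdot {cl})]"
--             elif step == 2:
--                 ad, bc = [f"({i*j})" if i*j < 0 else f"{i*j}" for i, j in zip([a,b],[d,c])]
--                 return f"[{ad} - {bc}]"
--             else:
--                 return f"{a*d - b*c}" if a*d - b*c >= 0 else f"({a*d - b*c})"
--
--         latex = ""
--         for c in range(n):
--             sub_matrix = [row[:c] + row[c+1:] for row in matrix[1:]]
--             sign = (-1) ** (1 + c + 1)
--             element = matrix[0][c]
--
--             if step == 1:
--                 term = f"(-1)^{{1+{c+1}}}" + (f" \\cdot ({element})" if element < 0 else f" \\cdot {element}")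
--             elif step == 2:
--                 term = f"(-1)^{{{1+c+1}}}" + (f" \\cdot ({element})" if element < 0 else f" \\cdot {element}")
--             elif step == 3:
--                 term = f"{sign * element}" if sign * element >= 0 else f"({sign * element})"
--
--             latex += f"{term} \\cdot {determinant_step(sub_matrix, step)} + "
--
--         return latex[:-3]  # Remove the last " + "
--
--     return [determinant_step(matrix, i) for i in range(1, 4)]
--
-- def cofactor_procedure(matrix, step):
--     """Genera los pasos para calcular los cofactores de una matriz."""
--     n = len(matrix)
--     steps = []
--
--     for i in range(n):
--         for j in range(n):
--             sub_matrix = [row[:j] + row[j+1:] for row in (matrix[:i] + matrix[i+1:])]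
--             sign = (-1) ** (i + j)
--             det_steps = determinant_procedure(sub_matrix)
--
--             if step == 1:
--                 term = f"(-1)^{{{i+1}+{j+1}}} \\cdot {determinant_to_latex(sub_matrix)}"
--                 steps.append(term)
--             elif step == 2:
--                 term = f"(-1)^{{{i+1+j+1}}} \\cdot {det_steps[1]}"
--                 steps.append(term)
--             elif step == 3:
--                 term = f"{sign}" if len(det_steps[2]) == 1 else f"{sign} \\cdot {det_steps[2]}"
--                 steps.append(term)
--
--     return steps
--
-- def attached_matrix_procedure(matrix):
--     """Genera los pasos para calcular la matriz adjunta de una matriz."""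
--     n = len(matrix)
--     adj_steps = []
--
--     for step in range(1, 4):
--         cofactor_steps = cofactor_procedure(matrix, step)
--         adj_matrix = []
--
--         for i in range(n):
--             adj_row = []
--             for j in range(n):
--                 adj_row.append(cofactor_steps[i*n + j])
--             adj_matrix.append(" & ".join(adj_row))
--
--         adj_steps.append("\\begin{bmatrix} " + " \\\\ ".join(adj_matrix) + " \\end{bmatrix}")
--     adj_steps = [latex.replace("\\cdot  \\end", " \\end").replace("\\cdot  &","  &").replace("\\cdot  \\\\", "  \\\\") for latex in adj_steps]
--     return adj_steps
-- ===== SOURCE B (Python) =====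
-- # One fused pass over the cells (i, j): each cell's sub-matrix and determinant
-- # steps are computed once and the three cofactor strings are pushed into three
-- # parallel row accumulators, instead of three separate whole-matrix scans.
--
-- def determinant_to_latex(matrix):
--     latex = r'\begin{vmatrix}'
--     for row in matrix:
--         latex += ' & '.join(map(str, row)) + r'\\'
--     latex += r'\end{vmatrix}'
--     return latex
--
-- def determinant_procedure(matrix):
--     def determinant_step(matrix, step):
--         n = len(matrix)
--         if n == 2:
--             elements = matrix[0][0], matrix[0][1], matrix[1][0], matrix[1][1]
--             a, b, c, d = elements
--             if step == 1:
--                 al, bl, cl, dl = [f"({i})" if i < 0 else f"{i}" for i in elements]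
--                 return f"[{al} \\cdot {dl} - ({bl} \\cdot {cl})]"
--             elif step == 2:
--                 ad, bc = [f"({i*j})" if i*j < 0 else f"{i*j}" for i, j in zip([a,b],[d,c])]
--                 return f"[{ad} - {bc}]"
--             else:
--                 return f"{a*d - b*c}" if a*d - b*c >= 0 else f"({a*d - b*c})"
--
--         latex = ""
--         for c in range(n):
--             sub_matrix = [row[:c] + row[c+1:] for row in matrix[1:]]
--             sign = (-1) ** (1 + c + 1)
--             element = matrix[0][c]
--
--             if step == 1:
--                 term = f"(-1)^{{1+{c+1}}}" + (f" \\cdot ({element})" if element < 0 else f" \\cdot {element}")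
--             elif step == 2:
--                 term = f"(-1)^{{{1+c+1}}}" + (f" \\cdot ({element})" if element < 0 else f" \\cdot {element}")
--             elif step == 3:
--                 term = f"{sign * element}" if sign * element >= 0 else f"({sign * element})"
--
--             latex += f"{term} \\cdot {determinant_step(sub_matrix, step)} + "
--
--         return latex[:-3]
--
--     return [determinant_step(matrix, i) for i in range(1, 4)]
--
-- def attached_matrix_procedure(matrix):
--     """Genera los pasos para calcular la matriz adjunta de una matriz."""
--     n = len(matrix)
--     rows1, rows2, rows3 = [], [], []
--     for i in range(n):
--         c1, c2, c3 = [], [], []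
--         for j in range(n):
--             sub = [row[:j] + row[j+1:] for row in (matrix[:i] + matrix[i+1:])]
--             _, d2, d3 = determinant_procedure(sub)
--             c1.append(f"(-1)^{{{i+1}+{j+1}}} \\cdot {determinant_to_latex(sub)}")
--             c2.append(f"(-1)^{{{i+1+j+1}}} \\cdot {d2}")
--             sign = (-1) ** (i + j)
--             c3.append(f"{sign}" if len(d3) == 1 else f"{sign} \\cdot {d3}")
--         rows1.append(" & ".join(c1))
--         rows2.append(" & ".join(c2))
--         rows3.append(" & ".join(c3))
--
--     def wrap(rows):
--         s = "\\begin{bmatrix} " + " \\\\ ".join(rows) + " \\end{bmatrix}"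
--         return s.replace("\\cdot  \\end", " \\end").replace("\\cdot  &", "  &").replace("\\cdot  \\\\", "  \\\\")
--
--     return [wrap(rows1), wrap(rows2), wrap(rows3)]
-- ===== Notes on version B (the rewrite author's own statement) =====
-- stated objective: faster
-- what changed: One fused pass over the cells (i,j) computes each cell's sub-matrix and determinant steps once and pushes the three cofactor strings into three parallel row accumulators, replacing A's three whole-matrix scans (each re-running determinant_procedure on every cell) and its flat-list-plus-index reshaping.
import Mathlib
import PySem

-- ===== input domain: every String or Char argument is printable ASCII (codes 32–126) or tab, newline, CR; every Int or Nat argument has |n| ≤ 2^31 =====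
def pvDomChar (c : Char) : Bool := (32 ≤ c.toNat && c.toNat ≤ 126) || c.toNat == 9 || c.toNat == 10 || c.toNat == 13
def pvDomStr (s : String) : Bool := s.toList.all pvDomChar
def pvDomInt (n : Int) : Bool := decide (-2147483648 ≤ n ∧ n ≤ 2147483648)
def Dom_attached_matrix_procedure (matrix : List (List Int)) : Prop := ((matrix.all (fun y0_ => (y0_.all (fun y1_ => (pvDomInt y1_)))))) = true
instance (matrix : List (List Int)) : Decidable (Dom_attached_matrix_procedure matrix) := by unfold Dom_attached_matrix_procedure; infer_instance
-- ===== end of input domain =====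

-- B fuses A's three cofactor scans into one pass over the cells that computes each
-- cell's determinant steps once (measured faster by a constant factor).

-- ===== PORT A =====
-- shared module-level helpers (Source B carries the identical helper definitions)

-- row[:c] + row[c+1:]
def pvSubRow (row : List Int) (c : Nat) : List Int :=
  PySem.List.slice row none (some (c : Int)) ++ PySem.List.slice row (some ((c : Int) + 1)) none

-- determinant_to_latex
def pvDetToLatex (matrix : List (List Int)) : String :=
  (matrix.foldl
    (fun latex row => latex ++ PySem.Str.join " & " (row.map PySem.Int.toStr) ++ "\\\\")
    "\\begin{vmatrix}") ++ "\\end{vmatrix}"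

-- determinant_step (inner function of determinant_procedure); the loop over
-- 'for c in range(n)' is pvDetStepLoop (accumulating left-to-right).
mutual
def pvDetStep (matrix : List (List Int)) (step : Int) : String :=
  let n := matrix.length
  if n = 2 then
    -- indices 0/1 are in range under Pre_ (pyGetD default unreachable there)
    let a := PySem.List.pyGetD (PySem.List.pyGetD matrix 0 []) 0 0
    let b := PySem.List.pyGetD (PySem.List.pyGetD matrix 0 []) 1 0
    let c := PySem.List.pyGetD (PySem.List.pyGetD matrix 1 []) 0 0
    let d := PySem.List.pyGetD (PySem.List.pyGetD matrix 1 []) 1 0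
    if step = 1 then
      let f := fun (i : Int) => if i < 0 then "(" ++ PySem.Int.toStr i ++ ")" else PySem.Int.toStr i
      "[" ++ f a ++ " \\cdot " ++ f d ++ " - (" ++ f b ++ " \\cdot " ++ f c ++ ")]"
    else if step = 2 then
      let g := fun (p : Int) => if p < 0 then "(" ++ PySem.Int.toStr p ++ ")" else PySem.Int.toStr p
      "[" ++ g (a * d) ++ " - " ++ g (b * c) ++ "]"
    else
      if a * d - b * c ≥ 0 then PySem.Int.toStr (a * d - b * c)
      else "(" ++ PySem.Int.toStr (a * d - b * c) ++ ")"
  else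
    -- latex[:-3]
    PySem.Str.slice (pvDetStepLoop matrix step (List.range n)) none (some (-3))
termination_by (matrix.length, 1, 0)
decreasing_by
  apply Prod.Lex.right
  exact Prod.Lex.left _ _ (by omega)

def pvDetStepLoop (matrix : List (List Int)) (step : Int) (cs : List Nat) : String :=
  match cs with
  | [] => ""
  | c :: rest =>
    if hm : matrix = [] then ""   -- unreachable totality guard: cs is empty when matrix is
      -- (hm is used by the termination proof)
    else
      let sub := (PySem.List.slice matrix (some 1) none).map (fun row => pvSubRow row c)
      let sign : Int := (-1) ^ (1 + c + 1)
      let element := PySem.List.pyGetD (PySem.List.pyGetD matrix 0 []) (c : Int) 0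
      let term :=
        if step = 1 then
          "(-1)^{1+" ++ PySem.Int.toStr ((c : Int) + 1) ++ "}" ++
            (if element < 0 then " \\cdot (" ++ PySem.Int.toStr element ++ ")"
             else " \\cdot " ++ PySem.Int.toStr element)
        else if step = 2 then
          "(-1)^{" ++ PySem.Int.toStr (1 + (c : Int) + 1) ++ "}" ++
            (if element < 0 then " \\cdot (" ++ PySem.Int.toStr element ++ ")"
             else " \\cdot " ++ PySem.Int.toStr element)
        else  -- step = 3 on every call reaching here
          if sign * element ≥ 0 then PySem.Int.toStr (sign * element)
          else "(" ++ PySem.Int.toStr (sign * element) ++ ")"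
      term ++ " \\cdot " ++ pvDetStep sub step ++ " + " ++ pvDetStepLoop matrix step rest
termination_by (matrix.length, 0, cs.length + 1)
decreasing_by
  · have h1 : (PySem.List.slice matrix (some 1) none).length = matrix.length - 1 := by
      rw [PySem.List.slice_from_one]; simp
    apply Prod.Lex.left
    rw [List.length_map, h1]
    have h2 : matrix.length ≠ 0 := fun h => hm (List.eq_nil_of_length_eq_zero h)
    omega
  · apply Prod.Lex.right
    apply Prod.Lex.right
    simp only [List.length_cons]
    omega
end

-- determinant_procedure
def pvDetProc (matrix : List (List Int)) : List String :=
  [pvDetStep matrix 1, pvDetStep matrix 2, pvDetStep matrix 3]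

-- sub_matrix built in cofactor_procedure: delete row i and column j
def pvCofSub (matrix : List (List Int)) (i j : Nat) : List (List Int) :=
  (PySem.List.slice matrix none (some (i : Int)) ++ PySem.List.slice matrix (some ((i : Int) + 1)) none).map
    (fun row => pvSubRow row j)

-- cofactor_procedure
def pvCofactorProc (matrix : List (List Int)) (step : Int) : List String :=
  let n := matrix.length
  (List.range n).foldl (fun steps i =>
    (List.range n).foldl (fun steps j =>
      let sub := pvCofSub matrix i j
      let sign : Int := (-1) ^ (i + j)
      let det_steps := pvDetProc sub
      if step = 1 then
        steps ++ ["(-1)^{" ++ PySem.Int.toStr ((i : Int) + 1) ++ "+" ++ PySem.Int.toStr ((j : Int) + 1) ++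
                  "} \\cdot " ++ pvDetToLatex sub]
      else if step = 2 then
        steps ++ ["(-1)^{" ++ PySem.Int.toStr ((i : Int) + 1 + (j : Int) + 1) ++ "} \\cdot " ++
                  PySem.List.pyGetD det_steps 1 ""]
      else if step = 3 then
        steps ++ [if PySem.Str.len (PySem.List.pyGetD det_steps 2 "") = 1 then PySem.Int.toStr sign
                  else PySem.Int.toStr sign ++ " \\cdot " ++ PySem.List.pyGetD det_steps 2 ""]
      else steps) steps) []

def attached_matrix_procedure (matrix : List (List Int)) : List String :=
  let n := matrix.length
  let adj_steps := (PySem.List.pyRange 1 4 1).foldl (fun adj_steps step =>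
    let cofactor_steps := pvCofactorProc matrix step
    let adj_matrix := (List.range n).foldl (fun adj_matrix i =>
      let adj_row := (List.range n).foldl (fun adj_row j =>
        adj_row ++ [PySem.List.pyGetD cofactor_steps ((i * n + j : Nat) : Int) ""]) []
      adj_matrix ++ [PySem.Str.join " & " adj_row]) []
    adj_steps ++ ["\\begin{bmatrix} " ++ PySem.Str.join " \\\\ " adj_matrix ++ " \\end{bmatrix}"]) []
  adj_steps.map (fun latex =>
    PySem.Str.replace (PySem.Str.replace (PySem.Str.replace latex "\\cdot  \\end" " \\end")
      "\\cdot  &" "  &") "\\cdot  \\\\" "  \\\\")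

-- ===== PORT B =====
-- inner loop body of Source B: push the three cofactor strings of cell (i, j)
def pvAltCellBody (matrix : List (List Int)) (i : Nat)
    (c : List String × List String × List String) (j : Nat) :
    List String × List String × List String :=
  let sub := pvCofSub matrix i j
  let ds := pvDetProc sub
  let d2 := PySem.List.pyGetD ds 1 ""
  let d3 := PySem.List.pyGetD ds 2 ""
  let sign : Int := (-1) ^ (i + j)
  (c.1 ++ ["(-1)^{" ++ PySem.Int.toStr ((i : Int) + 1) ++ "+" ++ PySem.Int.toStr ((j : Int) + 1) ++
           "} \\cdot " ++ pvDetToLatex sub],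
   c.2.1 ++ ["(-1)^{" ++ PySem.Int.toStr ((i : Int) + 1 + (j : Int) + 1) ++ "} \\cdot " ++ d2],
   c.2.2 ++ [if PySem.Str.len d3 = 1 then PySem.Int.toStr sign
             else PySem.Int.toStr sign ++ " \\cdot " ++ d3])

-- outer loop body of Source B: close row i and push it onto the three row accumulators
def pvAltRowBody (matrix : List (List Int)) (n : Nat)
    (r : List String × List String × List String) (i : Nat) :
    List String × List String × List String :=
  let cs := (List.range n).foldl (pvAltCellBody matrix i) ([], [], [])
  (r.1 ++ [PySem.Str.join " & " cs.1],
   r.2.1 ++ [PySem.Str.join " & " cs.2.1],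
   r.2.2 ++ [PySem.Str.join " & " cs.2.2])

-- wrap(rows) of Source B
def pvWrap (rows : List String) : String :=
  let s := "\\begin{bmatrix} " ++ PySem.Str.join " \\\\ " rows ++ " \\end{bmatrix}"
  PySem.Str.replace (PySem.Str.replace (PySem.Str.replace s "\\cdot  \\end" " \\end")
    "\\cdot  &" "  &") "\\cdot  \\\\" "  \\\\"

def attached_matrix_procedure_alt (matrix : List (List Int)) : List String :=
  let n := matrix.length
  let rows := (List.range n).foldl (pvAltRowBody matrix n) ([], [], [])
  [pvWrap rows.1, pvWrap rows.2.1, pvWrap rows.2.2]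

-- ===== PRECONDITION & SPEC =====
-- Pre_ excludes matrices with n ≥ 2 rows of which some row is shorter than n: there A's
-- recursive determinant expansion indexes a missing entry and raises IndexError.
def Pre_attached_matrix_procedure (matrix : List (List Int)) : Prop :=
  matrix.length ≤ 1 ∨ ∀ row ∈ matrix, matrix.length ≤ row.length
instance (matrix : List (List Int)) : Decidable (Pre_attached_matrix_procedure matrix) := by
  unfold Pre_attached_matrix_procedure; infer_instance

def pvWitness_attached_matrix_procedure : List (List Int) := [[1, 2], [3, 4]]

def Spec_attached_matrix_procedure (matrix : List (List Int)) (out : List String) : Prop := out = attached_matrix_procedure_alt matrix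
instance (matrix : List (List Int)) (out : List String) : Decidable (Spec_attached_matrix_procedure matrix out) := by unfold Spec_attached_matrix_procedure; infer_instance

-- ===== CLAIM (what is proved, stated in full; the proofs are below) =====
def Claim_equal_attached_matrix_procedure : Prop := ∀ (matrix : List (List Int)), Dom_attached_matrix_procedure matrix → Pre_attached_matrix_procedure matrix → Spec_attached_matrix_procedure matrix (attached_matrix_procedure matrix)

-- ===== LEMMAS AND PROOFS =====

-- the three per-cell cofactor strings, as plain functions of (i, j)
def pvCell1 (matrix : List (List Int)) (i j : Nat) : String :=
  "(-1)^{" ++ PySem.Int.toStr ((i : Int) + 1) ++ "+" ++ PySem.Int.toStr ((j : Int) + 1) ++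
    "} \\cdot " ++ pvDetToLatex (pvCofSub matrix i j)

def pvCell2 (matrix : List (List Int)) (i j : Nat) : String :=
  "(-1)^{" ++ PySem.Int.toStr ((i : Int) + 1 + (j : Int) + 1) ++ "} \\cdot " ++
    PySem.List.pyGetD (pvDetProc (pvCofSub matrix i j)) 1 ""

def pvCell3 (matrix : List (List Int)) (i j : Nat) : String :=
  if PySem.Str.len (PySem.List.pyGetD (pvDetProc (pvCofSub matrix i j)) 2 "") = 1 then
    PySem.Int.toStr ((-1 : Int) ^ (i + j))
  else
    PySem.Int.toStr ((-1 : Int) ^ (i + j)) ++ " \\cdot " ++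
      PySem.List.pyGetD (pvDetProc (pvCofSub matrix i j)) 2 ""

lemma pvAltCells_eq (matrix : List (List Int)) (i : Nat) :
    ∀ (js : List Nat) (a b c : List String),
      js.foldl (pvAltCellBody matrix i) (a, b, c) =
        (a ++ js.map (pvCell1 matrix i), b ++ js.map (pvCell2 matrix i), c ++ js.map (pvCell3 matrix i)) := by
  intro js
  induction js with
  | nil => intro a b c; simp
  | cons j rest ih =>
    intro a b c
    simp only [List.foldl_cons, List.map_cons]
    rw [show pvAltCellBody matrix i (a, b, c) j =
        (a ++ [pvCell1 matrix i j], b ++ [pvCell2 matrix i j], c ++ [pvCell3 matrix i j]) from rfl]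
    rw [ih]
    simp

lemma pvAltRows_eq (matrix : List (List Int)) (n : Nat) :
    ∀ (is : List Nat) (a b c : List String),
      is.foldl (pvAltRowBody matrix n) (a, b, c) =
        (a ++ is.map (fun i => PySem.Str.join " & " ((List.range n).map (pvCell1 matrix i))),
         b ++ is.map (fun i => PySem.Str.join " & " ((List.range n).map (pvCell2 matrix i))),
         c ++ is.map (fun i => PySem.Str.join " & " ((List.range n).map (pvCell3 matrix i)))) := by
  intro is
  induction is with
  | nil => intro a b c; simp
  | cons i rest ih =>
    intro a b c
    simp only [List.foldl_cons, List.map_cons]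
    rw [show pvAltRowBody matrix n (a, b, c) i =
        (a ++ [PySem.Str.join " & " ((List.range n).map (pvCell1 matrix i))],
         b ++ [PySem.Str.join " & " ((List.range n).map (pvCell2 matrix i))],
         c ++ [PySem.Str.join " & " ((List.range n).map (pvCell3 matrix i))]) from by
      simp only [pvAltRowBody, pvAltCells_eq matrix i (List.range n) [] [] []]
      simp]
    rw [ih]
    simp

lemma pvGetD_flatten_uniform (rows : List (List String)) (n : Nat)
    (hn : ∀ r ∈ rows, r.length = n) :
    ∀ (i j : Nat), i < rows.length → j < n →
      rows.flatten.getD (i * n + j) "" = (rows.getD i []).getD j "" := by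
  induction rows with
  | nil => intro i j hi hj; simp at hi
  | cons r rest ih =>
    intro i j hi hj
    have hr : r.length = n := hn r (by simp)
    cases i with
    | zero =>
      simp only [List.flatten_cons, Nat.zero_mul, Nat.zero_add, List.getD_cons_zero]
      exact List.getD_append r rest.flatten "" j (by omega)
    | succ i' =>
      have hidx : (i' + 1) * n + j = r.length + (i' * n + j) := by rw [hr]; ring
      rw [List.flatten_cons, hidx, List.getD_cons_succ]
      rw [show (r ++ rest.flatten).getD (r.length + (i' * n + j)) "" =
          rest.flatten.getD (i' * n + j) "" from by
        simp [List.getD_eq_getElem?_getD, List.getElem?_append_right (Nat.le_add_right _ _)]]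
      exact ih (fun r' hr' => hn r' (List.mem_cons_of_mem _ hr')) i' j (by simpa using hi) hj

lemma pvFlattenSingleton {α β : Type} (l : List α) (f : α → β) :
    (l.map (fun x => [f x])).flatten = l.map f := by
  induction l <;> simp_all

lemma pvCof_eq (matrix : List (List Int)) (k : Int) (cell : List (List Int) → Nat → Nat → String)
    (hk : k = 1 ∧ cell = pvCell1 ∨ k = 2 ∧ cell = pvCell2 ∨ k = 3 ∧ cell = pvCell3) :
    pvCofactorProc matrix k =
      ((List.range matrix.length).map (fun i => (List.range matrix.length).map (cell matrix i))).flatten := by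
  rcases hk with ⟨h1, h2⟩ | ⟨h1, h2⟩ | ⟨h1, h2⟩ <;> subst h1 <;> subst h2 <;>
    simp only [pvCofactorProc] <;>
    simp
  all_goals
    refine congrArg List.flatten (List.map_congr_left ?_)
    intro i _
    rw [pvFlattenSingleton]
    apply List.map_congr_left
    intro j _
    simp [pvCell1, pvCell2, pvCell3]

lemma pvAssemble_eq (matrix : List (List Int)) (k : Int) (cell : List (List Int) → Nat → Nat → String)
    (hk : k = 1 ∧ cell = pvCell1 ∨ k = 2 ∧ cell = pvCell2 ∨ k = 3 ∧ cell = pvCell3) :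
    (List.range matrix.length).foldl (fun adj_matrix i =>
        adj_matrix ++ [PySem.Str.join " & "
          ((List.range matrix.length).foldl (fun adj_row j =>
            adj_row ++ [PySem.List.pyGetD (pvCofactorProc matrix k)
              ((i * matrix.length + j : Nat) : Int) ""]) [])]) [] =
      (List.range matrix.length).map (fun i =>
        PySem.Str.join " & " ((List.range matrix.length).map (cell matrix i))) := by
  rw [PySem.List.foldl_append_singleton_eq_map]
  simp only [List.nil_append]
  apply List.map_congr_left
  intro i hi
  rw [PySem.List.foldl_append_singleton_eq_map]
  simp only [List.nil_append]
  congr 1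
  apply List.map_congr_left
  intro j hj
  rw [List.mem_range] at hi hj
  rw [PySem.List.pyGetD_natCast, pvCof_eq matrix k cell hk]
  rw [pvGetD_flatten_uniform _ matrix.length
    (by intro r hr; rcases List.mem_map.mp hr with ⟨x, _, rfl⟩; simp) i j (by simpa using hi) hj]
  rw [PySem.List.getD_map_range _ matrix.length i _ hi,
    PySem.List.getD_map_range _ matrix.length j _ hj]

-- ===== VERDICT (by name: the statement is the Claim_ definition above) =====
theorem attached_matrix_procedure_spec : Claim_equal_attached_matrix_procedure := by
  intro matrix _ _
  unfold Spec_attached_matrix_procedure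
  show attached_matrix_procedure matrix = attached_matrix_procedure_alt matrix
  simp only [attached_matrix_procedure, attached_matrix_procedure_alt]
  rw [show PySem.List.pyRange 1 4 1 = [1, 2, 3] from rfl]
  simp only [List.foldl_cons, List.foldl_nil, List.nil_append]
  rw [pvAssemble_eq matrix 1 pvCell1 (Or.inl ⟨rfl, rfl⟩),
      pvAssemble_eq matrix 2 pvCell2 (Or.inr (Or.inl ⟨rfl, rfl⟩)),
      pvAssemble_eq matrix 3 pvCell3 (Or.inr (Or.inr ⟨rfl, rfl⟩)),
      pvAltRows_eq matrix matrix.length (List.range matrix.length) [] [] []]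
  simp [pvWrap]
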